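-- pv_equiv track=rewrite | github.com/conglu1997/erdos_321_computation | pruning.py | _forced_by_modular_obstruction
-- ===== SOURCE A (Python) =====
-- from typing import Dict, Iterable, List, Sequence, Set, Tuple
--
-- def _primes_up_to(n: int) -> List[int]:
--     """Simple sieve-less prime list; n is small (<= few hundred) in practice."""
--     primes: List[int] = []
--     for cand in range(2, n + 1):
--         is_prime = True
--         for p in primes:
--             if p * p > cand:
--                 break
--             if cand % p == 0:
--                 is_prime = False
--                 break
--         if is_prime:
--             primes.append(cand)
--     return primes
--
-- def _zero_sum_patterns_mod_p(
--     p: int, multipliers: Sequence[int]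
-- ) -> List[Tuple[int, ...]]:
--     """All sign patterns s_k in {-1,0,1} with Σ s_k/k ≡ 0 mod p (non-trivial)."""
--     inv_cache = {k: pow(k, -1, p) for k in multipliers}
--     patterns: List[Tuple[int, ...]] = []
--     base = 3 ** len(multipliers)
--     for mask in range(1, base):  # skip all-zero
--         tmp = mask
--         total = 0
--         signs: List[int] = []
--         for k in multipliers:
--             tmp, digit = divmod(tmp, 3)
--             if digit == 0:
--                 signs.append(0)
--                 continue
--             coef = 1 if digit == 1 else -1
--             signs.append(coef)
--             total = (total + coef * inv_cache[k]) % p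
--         if total == 0:
--             patterns.append(tuple(signs))
--     return patterns
--
-- def _forced_by_modular_obstruction(
--     N: int, already_forced: Set[int]
-- ) -> Tuple[Set[int], List[List[int]]]:
--     """Primes with p^2 > N: use modular sums to certify non-involvement.
--
--     For such primes, any relation using a multiple kp contributes a factor
--     L/(kp) ≡ (lcm_without_p / k) mod p. If no non-zero sign pattern on the
--     available multiples makes the mod-p sum vanish, then none of those multiples
--     can appear in a relation and they are safe. If the only solutions are “all
--     +1”/“all -1” across every multiple, record an all-or-none group to shrink
--     search when enumerating collisions.
--     """
--     forced: Set[int] = set()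
--     groups: List[List[int]] = []
--     primes = [p for p in _primes_up_to(N) if p * p > N]
--     for p in primes:
--         multipliers = [k for k in range(1, N // p + 1) if k * p not in already_forced]
--         if not multipliers:
--             continue
--         patterns = _zero_sum_patterns_mod_p(p, multipliers)
--         if not patterns:
--             forced.update({k * p for k in multipliers})
--             continue
--         # Detect the simple “all or none” structure: the only solutions are
--         # all +1 or all -1 on the full support.
--         full_support = tuple(1 for _ in multipliers)
--         neg_full_support = tuple(-x for x in full_support)
--         pattern_set = set(patterns)
--         if pattern_set in ({full_support}, {full_support, neg_full_support}):
--             groups.append([k * p for k in multipliers])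
--     return forced, groups
-- ===== SOURCE B (Python) =====
-- def _primes_up_to(n):
--     """Simple sieve-less prime list; n is small (<= few hundred) in practice."""
--     primes = []
--     for cand in range(2, n + 1):
--         is_prime = True
--         for p in primes:
--             if p * p > cand:
--                 break
--             if cand % p == 0:
--                 is_prime = False
--                 break
--         if is_prime:
--             primes.append(cand)
--     return primes
--
-- def _forced_by_modular_obstruction(N, already_forced):
--     """DP by residue instead of enumerating all 3^m sign patterns.
--
--     For each large prime p, count the sign patterns whose mod-p sum vanishes
--     with a backward dynamic programme over residues: e[t] = number of sign
--     choices on the remaining multipliers that turn a running total t into 0.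
--     The full zero-sum count (including the all-zero pattern) decides both
--     branches: 1 -> no non-trivial pattern (multiples are safe); 3 with the
--     all-(+1) pattern a solution -> the solutions are exactly all+1/all-1.
--     """
--     forced = set()
--     groups = []
--     for p in _primes_up_to(N):
--         if p * p > N:
--             multipliers = [k for k in range(1, N // p + 1) if k * p not in already_forced]
--             if not multipliers:
--                 continue
--             invs = [pow(k, -1, p) for k in multipliers]
--             e = [1 if t == 0 else 0 for t in range(p)]
--             for inv in reversed(invs):
--                 e = [e[t] + e[(t + inv) % p] + e[(t - inv) % p] for t in range(p)]
--             zero_count = e[0]  # sign patterns (incl. all-zero) with sum ≡ 0 (mod p)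
--             if zero_count == 1:
--                 forced.update({k * p for k in multipliers})
--             elif zero_count == 3 and sum(invs) % p == 0:
--                 groups.append([k * p for k in multipliers])
--     return forced, groups
-- ===== Notes on version B (the rewrite author's own statement) =====
-- stated objective: faster
-- what changed: Replaces A's brute-force enumeration of all 3^m sign patterns per prime with a backward dynamic programme over residues mod p that counts zero-sum patterns, deciding the 'no pattern' branch by count==1 and the 'all-or-none' branch by count==3 plus a single full-support sum check.
import Mathlib
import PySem

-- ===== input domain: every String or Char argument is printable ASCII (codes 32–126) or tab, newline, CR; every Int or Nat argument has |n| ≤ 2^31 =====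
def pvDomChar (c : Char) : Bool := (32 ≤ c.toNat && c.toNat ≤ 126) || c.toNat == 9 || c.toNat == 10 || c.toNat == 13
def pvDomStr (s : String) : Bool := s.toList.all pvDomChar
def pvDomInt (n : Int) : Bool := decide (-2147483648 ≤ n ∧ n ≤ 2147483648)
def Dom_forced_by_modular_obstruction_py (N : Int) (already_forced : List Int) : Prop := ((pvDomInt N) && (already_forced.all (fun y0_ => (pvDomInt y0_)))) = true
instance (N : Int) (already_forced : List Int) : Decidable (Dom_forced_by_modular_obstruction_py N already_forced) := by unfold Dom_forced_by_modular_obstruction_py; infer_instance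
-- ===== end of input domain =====

-- B replaces A's per-prime enumeration of all 3^m sign patterns by a backward residue-count
-- DP mod p (objective: faster; a timing run measured the speed-up).

-- ===== PORT A =====
-- helper _primes_up_to: inner 'for p in primes' loop with its two breaks
def pvIsPrimeLoop (cand : Int) : List Int → Bool
  | [] => true
  | p :: rest =>
    if p * p > cand then true
    else if PySem.Int.mod cand p == 0 then false
    else pvIsPrimeLoop cand rest

def pvPrimesUpTo (n : Int) : List Int :=
  (PySem.List.pyRange 2 (n + 1) 1).foldl
    (fun primes cand => if pvIsPrimeLoop cand primes then primes ++ [cand] else primes) []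

-- pow(k, -1, p): the modular inverse via the extended-Euclid coefficient; exact on the
-- inputs reached here (0 < k < p, p prime, so gcd(k, p) = 1 and Python does not raise)
def pvModInv (k p : Int) : Int := PySem.Int.mod (Nat.gcdA k.toNat p.toNat) p

-- inner 'for k in multipliers' loop of _zero_sum_patterns_mod_p; state (tmp, total, signs),
-- returns (total, signs). inv_cache[k]: the key is always present, so getD's default is dead
def pvDecode (p : Int) (invCache : PySem.Dict Int Int) :
    List Int → Int → Int → List Int → Int × List Int
  | [], _, total, signs => (total, signs)
  | k :: rest, tmp, total, signs =>
    let tmp' := PySem.Int.floordiv tmp 3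
    let digit := PySem.Int.mod tmp 3
    if digit == 0 then pvDecode p invCache rest tmp' total (signs ++ [0])
    else
      let coef : Int := if digit == 1 then 1 else -1
      pvDecode p invCache rest tmp'
        (PySem.Int.mod (total + coef * invCache.getD k 0) p) (signs ++ [coef])

def pvZeroSumPatterns (p : Int) (multipliers : List Int) : List (List Int) :=
  let invCache : PySem.Dict Int Int :=
    multipliers.foldl (fun d k => d.insert k (pvModInv k p)) PySem.Dict.empty
  let base : Int := 3 ^ multipliers.length
  (PySem.List.pyRange 1 base 1).foldl
    (fun patterns mask =>
      let r := pvDecode p invCache multipliers mask 0 []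
      if r.1 == 0 then patterns ++ [r.2] else patterns) []

def forced_by_modular_obstruction_py (N : Int) (already_forced : List Int) :
    List Int × List (List Int) :=
  let primes := (pvPrimesUpTo N).filter (fun p => decide (p * p > N))
  primes.foldl
    (fun st p =>
      let multipliers := (PySem.List.pyRange 1 (PySem.Int.floordiv N p + 1) 1).filter
          (fun k => !(already_forced.contains (k * p)))
      if multipliers.isEmpty then st
      else
        let patterns := pvZeroSumPatterns p multipliers
        if patterns.isEmpty then
          (PySem.Set.update st.1 (multipliers.map (fun k => k * p)), st.2)
        else
          let full := multipliers.map (fun _ => (1 : Int))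
          let negFull := full.map (fun x => -x)
          let patternSet := PySem.Set.ofList patterns
          if PySem.Set.equal patternSet (PySem.Set.ofList [full])
              || PySem.Set.equal patternSet (PySem.Set.ofList [full, negFull]) then
            (st.1, st.2 ++ [multipliers.map (fun k => k * p)])
          else st)
    (PySem.Set.empty, [])

-- ===== PORT B =====
def forced_by_modular_obstruction_py_alt (N : Int) (already_forced : List Int) :
    List Int × List (List Int) :=
  (pvPrimesUpTo N).foldl
    (fun st p =>
      if p * p > N then
        let multipliers := (PySem.List.pyRange 1 (PySem.Int.floordiv N p + 1) 1).filter
            (fun k => !(already_forced.contains (k * p)))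
        if multipliers.isEmpty then st
        else
          let invs := multipliers.map (fun k => pvModInv k p)
          let e0 := (PySem.List.pyRange 0 p 1).map (fun t => if t == 0 then (1 : Int) else 0)
          -- 'for inv in reversed(invs)' rebuilding e: a right fold over invs
          let e := invs.foldr
            (fun inv e => (PySem.List.pyRange 0 p 1).map (fun t =>
              PySem.List.pyGetD e t 0
                + PySem.List.pyGetD e (PySem.Int.mod (t + inv) p) 0
                + PySem.List.pyGetD e (PySem.Int.mod (t - inv) p) 0)) e0
          let zeroCount := PySem.List.pyGetD e 0 0
          if zeroCount == 1 then
            (PySem.Set.update st.1 (multipliers.map (fun k => k * p)), st.2)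
          else if zeroCount == 3 && PySem.Int.mod invs.sum p == 0 then
            (st.1, st.2 ++ [multipliers.map (fun k => k * p)])
          else st
      else st)
    (PySem.Set.empty, [])


-- ===== PRECONDITION & SPEC =====
def Spec_forced_by_modular_obstruction_py (N : Int) (already_forced : List Int) (out : List Int × List (List Int)) : Prop := out = forced_by_modular_obstruction_py_alt N already_forced
instance (N : Int) (already_forced : List Int) (out : List Int × List (List Int)) : Decidable (Spec_forced_by_modular_obstruction_py N already_forced out) := by unfold Spec_forced_by_modular_obstruction_py; infer_instance

-- ===== CLAIM (what is proved, stated in full; the proofs are below) =====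
def Claim_equal_forced_by_modular_obstruction_py : Prop := ∀ (N : Int) (already_forced : List Int), Dom_forced_by_modular_obstruction_py N already_forced → Spec_forced_by_modular_obstruction_py N already_forced (forced_by_modular_obstruction_py N already_forced)

-- ===== LEMMAS AND PROOFS =====

-- all sign vectors of length m, in the order A's base-3 masks enumerate them
def pvSV : Nat → List (List Int)
  | 0 => [[]]
  | m + 1 => (pvSV m).flatMap (fun v => [0 :: v, 1 :: v, -1 :: v])

-- A's running total over (sign, inverse) pairs
def pvTot (p : Int) : List (Int × Int) → Int → Int
  | [], t => t
  | si :: rest, t =>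
    pvTot p rest (if si.1 = 0 then t else PySem.Int.mod (t + si.1 * si.2) p)

-- B's DP recurrence: number of sign vectors over invs completing t to total ≡ 0
def pvCnt (p : Int) : List Int → Int → Int
  | [], t => if t = 0 then 1 else 0
  | i :: is, t =>
    pvCnt p is t + pvCnt p is (PySem.Int.mod (t + i) p) + pvCnt p is (PySem.Int.mod (t - i) p)

theorem pv_foldl_filtered_mem {α : Type} (P : List α → α → Bool) :
    ∀ (l init : List α) (x : α),
      x ∈ l.foldl (fun acc c => if P acc c then acc ++ [c] else acc) init → x ∈ init ∨ x ∈ l := by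
  intro l
  induction l with
  | nil => intro init x h; exact Or.inl h
  | cons c rest ih =>
    intro init x h
    simp only [List.foldl_cons] at h
    rcases ih _ x h with h' | h'
    · by_cases hc : P init c
      · simp [hc] at h'
        rcases h' with h' | h'
        · exact Or.inl h'
        · exact Or.inr (by simp [h'])
      · simp [hc] at h'
        exact Or.inl h'
    · exact Or.inr (List.mem_cons_of_mem _ h')

theorem pv_mem_primesUpTo {x N : Int} (h : x ∈ pvPrimesUpTo N) : 2 ≤ x := by
  unfold pvPrimesUpTo at h
  rcases pv_foldl_filtered_mem (fun primes cand => pvIsPrimeLoop cand primes) _ _ _ h with h' | h'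
  · simp at h'
  · exact ((PySem.List.mem_pyRange_one).1 h').1

-- getD on a dict built by inserting distinct fresh keys
theorem pv_getD_foldl_insert (f : Int → Int) (ms : List Int) (hnd : ms.Nodup)
    {k : Int} (hk : k ∈ ms) :
    (ms.foldl (fun d k => d.insert k (f k)) PySem.Dict.empty).getD k 0 = f k := by
  have hitems : (ms.foldl (fun d k => d.insert k (f k)) PySem.Dict.empty).items
      = PySem.Dict.empty.items ++ ms.map (fun a => (a, f a)) :=
    PySem.Dict.items_foldl_insert_fresh ms (fun a => a) f PySem.Dict.empty
      (fun a _ => PySem.Dict.contains_empty a) (by simpa using hnd)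
  have hkeys : (ms.foldl (fun d k => d.insert k (f k)) PySem.Dict.empty).keys.Nodup :=
    PySem.Dict.nodup_keys_foldl_insert ms _ _ (by simp)
  refine PySem.Dict.getD_of_mem_items _ ?_ hkeys 0
  rw [hitems]
  simp
  exact Or.inr hk

theorem pv_divmod3 (r d : Nat) (hd : d < 3) :
    PySem.Int.floordiv ((3 * r + d : Nat) : Int) 3 = (r : Int) ∧
    PySem.Int.mod ((3 * r + d : Nat) : Int) 3 = (d : Int) := by
  constructor
  · rw [PySem.Int.floordiv_eq_ediv_of_pos (by norm_num)]
    omega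
  · rw [PySem.Int.mod_eq_emod_of_pos (by norm_num)]
    omega

theorem pv_range_mul3 (n : Nat) :
    List.range (3 * n) = (List.range n).flatMap (fun r => [3 * r, 3 * r + 1, 3 * r + 2]) := by
  induction n with
  | zero => rfl
  | succ n ih =>
    have h3 : 3 * (n + 1) = (3 * n + 1 + 1) + 1 := by omega
    rw [h3, List.range_succ, List.range_succ, List.range_succ, List.range_succ,
      List.flatMap_append, ← ih]
    simp

theorem pv_flatMap3_of_maps {α β γ : Type} :
    ∀ (L : List α) (M : List β) (f0 f1 f2 : α → γ) (g0 g1 g2 : β → γ),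
      L.map f0 = M.map g0 → L.map f1 = M.map g1 → L.map f2 = M.map g2 →
      L.flatMap (fun r => [f0 r, f1 r, f2 r]) = M.flatMap (fun v => [g0 v, g1 v, g2 v]) := by
  intro L
  induction L with
  | nil =>
    intro M f0 f1 f2 g0 g1 g2 h0 _ _
    cases M with
    | nil => rfl
    | cons b M => simp at h0
  | cons a L ih =>
    intro M f0 f1 f2 g0 g1 g2 h0 h1 h2
    cases M with
    | nil => simp at h0
    | cons b M =>
      simp only [List.map_cons, List.cons.injEq] at h0 h1 h2
      simp only [List.flatMap_cons, h0.1, h1.1, h2.1,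
        ih M f0 f1 f2 g0 g1 g2 h0.2 h1.2 h2.2]

theorem pv_decode_acc (p : Int) (c : PySem.Dict Int Int) :
    ∀ (ms : List Int) (tmp t : Int) (signs : List Int),
      pvDecode p c ms tmp t signs
        = ((pvDecode p c ms tmp t []).1, signs ++ (pvDecode p c ms tmp t []).2) := by
  intro ms
  induction ms with
  | nil => intro tmp t signs; simp [pvDecode]
  | cons k rest ih =>
    intro tmp t signs
    simp only [pvDecode]
    by_cases hd : PySem.Int.mod tmp 3 == 0
    · simp only [hd, if_true]
      rw [ih _ _ (signs ++ [0]), ih _ _ ([] ++ [0])]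
      simp
    · by_cases h1 : PySem.Int.mod tmp 3 == 1
      · simp only [hd, h1, if_true, Bool.false_eq_true, if_false]
        rw [ih _ _ (signs ++ [1]), ih _ _ ([] ++ [1])]
        simp
      · simp only [hd, h1, Bool.false_eq_true, if_false]
        rw [ih _ _ (signs ++ [-1]), ih _ _ ([] ++ [-1])]
        simp

theorem pv_decode_step (p : Int) (c : PySem.Dict Int Int) (k : Int) (rest : List Int)
    (r : Nat) (t : Int) (d : Nat) (hd : d < 3) :
    pvDecode p c (k :: rest) ((3 * r + d : Nat) : Int) t []
      = (if d = 0 then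
          ((pvDecode p c rest (r : Int) t []).1, 0 :: (pvDecode p c rest (r : Int) t []).2)
        else if d = 1 then
          ((pvDecode p c rest (r : Int) (PySem.Int.mod (t + 1 * c.getD k 0) p) []).1,
            1 :: (pvDecode p c rest (r : Int) (PySem.Int.mod (t + 1 * c.getD k 0) p) []).2)
        else
          ((pvDecode p c rest (r : Int) (PySem.Int.mod (t + (-1) * c.getD k 0) p) []).1,
            (-1) :: (pvDecode p c rest (r : Int) (PySem.Int.mod (t + (-1) * c.getD k 0) p) []).2)) := by
  have hdiv := (pv_divmod3 r d hd).1
  have hmod := (pv_divmod3 r d hd).2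
  simp only [pvDecode, hdiv, hmod]
  interval_cases d
  · norm_num
    rw [pv_decode_acc]
    simp
  · norm_num
    rw [pv_decode_acc]
    simp
  · norm_num
    rw [pv_decode_acc]
    simp

-- masks 0 .. 3^|ms|-1 decode exactly to the sign vectors with their running totals
theorem pv_decode_master (p : Int) (c : PySem.Dict Int Int) :
    ∀ (ms : List Int) (t : Int),
      (List.range (3 ^ ms.length)).map (fun mask => pvDecode p c ms ((mask : Nat) : Int) t [])
        = (pvSV ms.length).map
            (fun v => (pvTot p (v.zip (ms.map (fun k => c.getD k 0))) t, v)) := by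
  intro ms
  induction ms with
  | nil =>
    intro t
    simp [pvSV, pvDecode, pvTot]
  | cons k rest ih =>
    intro t
    have hpow : (3 : Nat) ^ (k :: rest).length = 3 * 3 ^ rest.length := by
      simp [List.length_cons, pow_succ]; ring
    rw [hpow, pv_range_mul3]
    simp only [List.length_cons, pvSV]
    rw [List.map_flatMap, List.map_flatMap]
    apply pv_flatMap3_of_maps
    · -- digit 0
      have h := congrArg (List.map (fun pr : Int × List Int => (pr.1, (0 : Int) :: pr.2))) (ih t)
      rw [List.map_map, List.map_map] at h
      calc (List.range (3 ^ rest.length)).map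
            (fun r => pvDecode p c (k :: rest) ((3 * r : Nat) : Int) t [])
          = (List.range (3 ^ rest.length)).map
            ((fun pr : Int × List Int => (pr.1, (0 : Int) :: pr.2)) ∘
              (fun mask => pvDecode p c rest ((mask : Nat) : Int) t [])) := by
            apply List.map_congr_left
            intro r _
            have := pv_decode_step p c k rest r t 0 (by omega)
            simpa using this
        _ = (pvSV rest.length).map
            ((fun pr : Int × List Int => (pr.1, (0 : Int) :: pr.2)) ∘
              (fun v => (pvTot p (v.zip (rest.map (fun k => c.getD k 0))) t, v))) := h
        _ = (pvSV rest.length).map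
            (fun v => (pvTot p ((0 :: v).zip ((k :: rest).map (fun k => c.getD k 0))) t, 0 :: v)) := by
            apply List.map_congr_left
            intro v _
            simp [pvTot]
    · -- digit 1
      have h := congrArg (List.map (fun pr : Int × List Int => (pr.1, (1 : Int) :: pr.2)))
        (ih (PySem.Int.mod (t + 1 * c.getD k 0) p))
      rw [List.map_map, List.map_map] at h
      calc (List.range (3 ^ rest.length)).map
            (fun r => pvDecode p c (k :: rest) ((3 * r + 1 : Nat) : Int) t [])
          = (List.range (3 ^ rest.length)).map
            ((fun pr : Int × List Int => (pr.1, (1 : Int) :: pr.2)) ∘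
              (fun mask => pvDecode p c rest ((mask : Nat) : Int)
                (PySem.Int.mod (t + 1 * c.getD k 0) p) [])) := by
            apply List.map_congr_left
            intro r _
            have := pv_decode_step p c k rest r t 1 (by omega)
            simpa using this
        _ = (pvSV rest.length).map
            ((fun pr : Int × List Int => (pr.1, (1 : Int) :: pr.2)) ∘
              (fun v => (pvTot p (v.zip (rest.map (fun k => c.getD k 0)))
                (PySem.Int.mod (t + 1 * c.getD k 0) p), v))) := h
        _ = (pvSV rest.length).map
            (fun v => (pvTot p ((1 :: v).zip ((k :: rest).map (fun k => c.getD k 0))) t, 1 :: v)) := by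
            apply List.map_congr_left
            intro v _
            simp [pvTot]
    · -- digit 2
      have h := congrArg (List.map (fun pr : Int × List Int => (pr.1, (-1 : Int) :: pr.2)))
        (ih (PySem.Int.mod (t + (-1) * c.getD k 0) p))
      rw [List.map_map, List.map_map] at h
      calc (List.range (3 ^ rest.length)).map
            (fun r => pvDecode p c (k :: rest) ((3 * r + 2 : Nat) : Int) t [])
          = (List.range (3 ^ rest.length)).map
            ((fun pr : Int × List Int => (pr.1, (-1 : Int) :: pr.2)) ∘
              (fun mask => pvDecode p c rest ((mask : Nat) : Int)
                (PySem.Int.mod (t + (-1) * c.getD k 0) p) [])) := by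
            apply List.map_congr_left
            intro r _
            have := pv_decode_step p c k rest r t 2 (by omega)
            simpa using this
        _ = (pvSV rest.length).map
            ((fun pr : Int × List Int => (pr.1, (-1 : Int) :: pr.2)) ∘
              (fun v => (pvTot p (v.zip (rest.map (fun k => c.getD k 0)))
                (PySem.Int.mod (t + (-1) * c.getD k 0) p), v))) := h
        _ = (pvSV rest.length).map
            (fun v => (pvTot p ((-1 :: v).zip ((k :: rest).map (fun k => c.getD k 0))) t, -1 :: v)) := by
            apply List.map_congr_left
            intro v _
            simp [pvTot]

theorem pvSV_eq_cons (m : Nat) : pvSV m = List.replicate m 0 :: (pvSV m).tail := by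
  induction m with
  | zero => rfl
  | succ m ih =>
    conv_lhs => rw [pvSV, ih]
    conv_rhs => rw [pvSV, ih]
    simp [List.replicate_succ]

theorem pv_fm {α β : Type} :
    ∀ (L : List α) (M : List β) (F : α → Int × List Int) (G : β → Int × List Int),
      L.map F = M.map G →
      (L.filter (fun x => (F x).1 == 0)).map (fun x => (F x).2)
        = (M.filter (fun y => (G y).1 == 0)).map (fun y => (G y).2) := by
  intro L
  induction L with
  | nil =>
    intro M F G h
    cases M with
    | nil => rfl
    | cons b M => simp at h
  | cons a L ih =>
    intro M F G h
    cases M with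
    | nil => simp at h
    | cons b M =>
      simp only [List.map_cons, List.cons.injEq] at h
      simp only [List.filter_cons, h.1]
      by_cases hz : (G b).1 == 0
      · simp only [hz, if_true, List.map_cons, h.1, ih M F G h.2]
      · simp only [hz, if_false, Bool.false_eq_true, ih M F G h.2]

theorem pv_map_tail {α β : Type} (f : α → β) (l : List α) :
    (l.map f).tail = l.tail.map f := by
  cases l <;> rfl

theorem pv_patterns_eq (p : Int) (ms : List Int) (hnd : ms.Nodup) :
    pvZeroSumPatterns p ms
      = ((pvSV ms.length).tail).filter
          (fun v => pvTot p (v.zip (ms.map (fun k => pvModInv k p))) 0 == 0) := by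
  unfold pvZeroSumPatterns
  set c : PySem.Dict Int Int :=
    ms.foldl (fun d k => d.insert k (pvModInv k p)) PySem.Dict.empty with hc
  have hmap : ms.map (fun k => c.getD k 0) = ms.map (fun k => pvModInv k p) :=
    List.map_congr_left (fun k hk => pv_getD_foldl_insert _ ms hnd hk)
  rw [← hmap]
  have hbase : ((3 : Int) ^ ms.length) = ((3 ^ ms.length : Nat) : Int) := by push_cast; ring
  have hpos : (0 : Int) < ((3 ^ ms.length : Nat) : Int) := by
    have : 0 < 3 ^ ms.length := pow_pos (by norm_num : (0:Nat) < 3) _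
    exact_mod_cast this
  have h0 : PySem.List.pyRange 0 ((3 ^ ms.length : Nat) : Int) 1
      = (List.range (3 ^ ms.length)).map (fun k : Nat => (k : Int)) :=
    PySem.List.pyRange_zero_nat _
  have hmasks : PySem.List.pyRange 1 ((3 : Int) ^ ms.length) 1
      = ((List.range (3 ^ ms.length)).map (fun k : Nat => (k : Int))).tail := by
    rw [hbase, ← h0, PySem.List.pyRange_one_cons hpos]
    norm_num
  rw [PySem.List.foldl_append_if (fun mask => (pvDecode p c ms mask 0 []).1 == 0)
    (fun mask => (pvDecode p c ms mask 0 []).2)]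
  rw [List.nil_append, hmasks]
  have hL : ((List.range (3 ^ ms.length)).map (fun k : Nat => (k : Int))).tail.map
        (fun mask => pvDecode p c ms mask 0 [])
      = ((pvSV ms.length).tail).map
        (fun v => (pvTot p (v.zip (ms.map (fun k => c.getD k 0))) 0, v)) := by
    have hm := congrArg List.tail (pv_decode_master p c ms 0)
    rw [pv_map_tail, pv_map_tail] at hm
    rw [pv_map_tail, List.map_map]
    exact hm
  have h2 := pv_fm _ _ _ _ hL
  simpa using h2

theorem pv_tot_emod (p : Int) (hp : 0 < p) :
    ∀ (l : List (Int × Int)) (t : Int), 0 ≤ t → t < p →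
      pvTot p l t = (t + (l.map (fun q => q.1 * q.2)).sum) % p := by
  intro l
  induction l with
  | nil =>
    intro t h0 h1
    simp [pvTot, Int.emod_eq_of_lt h0 h1]
  | cons si rest ih =>
    intro t h0 h1
    by_cases hs : si.1 = 0
    · simp only [pvTot, hs, if_true]
      rw [ih t h0 h1]
      simp [hs]
    · simp only [pvTot, if_neg hs]
      rw [PySem.Int.mod_eq_emod_of_pos hp]
      rw [ih _ (Int.emod_nonneg _ (by omega)) (Int.emod_lt_of_pos _ hp)]
      rw [Int.emod_add_emod]
      simp only [List.map_cons, List.sum_cons, ← add_assoc]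

theorem pv_sv_mem (m : Nat) (v : List Int) :
    v ∈ pvSV m ↔ v.length = m ∧ ∀ x ∈ v, x = 0 ∨ x = 1 ∨ x = -1 := by
  induction m generalizing v with
  | zero =>
    simp only [pvSV, List.mem_singleton, List.length_eq_zero_iff]
    constructor
    · rintro rfl; simp
    · rintro ⟨rfl, _⟩; rfl
  | succ m ih =>
    simp only [pvSV, List.mem_flatMap]
    constructor
    · rintro ⟨w, hw, hv⟩
      have hw' := (ih w).1 hw
      simp only [List.mem_cons, List.not_mem_nil, or_false] at hv
      rcases hv with rfl | rfl | rfl <;>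
        simp_all [List.length_cons]
    · rintro ⟨hlen, hall⟩
      cases v with
      | nil => simp at hlen
      | cons x w =>
        refine ⟨w, (ih w).2 ⟨by simpa using hlen, fun y hy => hall y (List.mem_cons_of_mem _ hy)⟩, ?_⟩
        rcases hall x (List.mem_cons_self) with rfl | rfl | rfl <;> simp

theorem pv_sv_nodup (m : Nat) : (pvSV m).Nodup := by
  induction m with
  | zero => simp [pvSV]
  | succ m ih =>
    show ((pvSV m).flatMap _).Nodup
    rw [List.nodup_flatMap]
    refine ⟨fun v _ => by simp, ?_⟩
    apply List.Pairwise.imp ?_ ih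
    intro v w hne x hx hx'
    simp only [List.mem_cons, List.not_mem_nil, or_false] at hx hx'
    rcases hx with rfl | rfl | rfl <;> rcases hx' with h | h | h <;> simp_all

theorem pv_tot_all_zero (p : Int) :
    ∀ (l : List (Int × Int)) (t : Int), (∀ q ∈ l, q.1 = 0) → pvTot p l t = t := by
  intro l
  induction l with
  | nil => intro t _; rfl
  | cons si rest ih =>
    intro t h
    simp only [pvTot, h si List.mem_cons_self, if_true]
    exact ih t (fun q hq => h q (List.mem_cons_of_mem _ hq))

theorem pv_countP_blocks (q : List Int → Bool) :
    ∀ (L : List (List Int)),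
      ((L.flatMap (fun v => [0 :: v, 1 :: v, -1 :: v])).countP q : Int)
        = (L.countP (fun v => q (0 :: v)) : Int) + (L.countP (fun v => q (1 :: v)) : Int)
          + (L.countP (fun v => q (-1 :: v)) : Int) := by
  intro L
  induction L with
  | nil => simp
  | cons v L ih =>
    simp only [List.flatMap_cons, List.countP_append, List.countP_cons]
    push_cast
    rw [List.countP_nil]
    push_cast at ih
    rw [ih]
    by_cases h0 : q (0 :: v) <;> by_cases h1 : q (1 :: v) <;> by_cases h2 : q (-1 :: v) <;>
      simp [h0, h1, h2] <;> ring

theorem pv_cnt_count (p : Int) (hp : 0 < p) :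
    ∀ (invs : List Int) (t : Int), 0 ≤ t → t < p →
      pvCnt p invs t
        = ((pvSV invs.length).countP (fun v => pvTot p (v.zip invs) t == 0) : Int) := by
  intro invs
  induction invs with
  | nil =>
    intro t h0 h1
    simp only [pvCnt, List.length_nil, pvSV]
    by_cases ht : t = 0 <;> simp [pvTot, ht]
  | cons i rest ih =>
    intro t h0 h1
    simp only [List.length_cons, pvSV, pvCnt]
    rw [pv_countP_blocks]
    have e0 : ∀ v : List Int,
        (pvTot p ((0 :: v).zip (i :: rest)) t == 0) = (pvTot p (v.zip rest) t == 0) := by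
      intro v; simp [pvTot]
    have e1 : ∀ v : List Int,
        (pvTot p ((1 :: v).zip (i :: rest)) t == 0)
          = (pvTot p (v.zip rest) (PySem.Int.mod (t + i) p) == 0) := by
      intro v; simp [pvTot]
    have e2 : ∀ v : List Int,
        (pvTot p ((-1 :: v).zip (i :: rest)) t == 0)
          = (pvTot p (v.zip rest) (PySem.Int.mod (t - i) p) == 0) := by
      intro v
      simp only [pvTot, List.zip_cons_cons]
      norm_num
      rw [sub_eq_add_neg]
    simp only [e0, e1, e2]
    rw [ih t h0 h1,
      ih _ (PySem.Int.mod_nonneg _ hp) (PySem.Int.mod_lt _ hp),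
      ih _ (PySem.Int.mod_nonneg _ hp) (PySem.Int.mod_lt _ hp)]

-- B's DP list computes pvCnt at every residue index
theorem pv_e_getD (p : Int) (hp : 0 < p) :
    ∀ (invs : List Int) (t : Int), 0 ≤ t → t < p →
      PySem.List.pyGetD
        (invs.foldr
          (fun inv e => (PySem.List.pyRange 0 p 1).map (fun t =>
            PySem.List.pyGetD e t 0
              + PySem.List.pyGetD e (PySem.Int.mod (t + inv) p) 0
              + PySem.List.pyGetD e (PySem.Int.mod (t - inv) p) 0))
          ((PySem.List.pyRange 0 p 1).map (fun t => if t == 0 then (1 : Int) else 0)))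
        t 0 = pvCnt p invs t := by
  intro invs
  induction invs with
  | nil =>
    intro t h0 h1
    rw [List.foldr_nil, PySem.List.pyGetD_map_pyRange_of_nonneg _ _ _ _ h0 h1]
    simp only [pvCnt]
    by_cases ht : t = 0 <;> simp [ht]
  | cons i rest ih =>
    intro t h0 h1
    rw [List.foldr_cons, PySem.List.pyGetD_map_pyRange_of_nonneg _ _ _ _ h0 h1]
    rw [ih t h0 h1, ih _ (PySem.Int.mod_nonneg _ hp) (PySem.Int.mod_lt _ hp),
      ih _ (PySem.Int.mod_nonneg _ hp) (PySem.Int.mod_lt _ hp)]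
    rfl

theorem pv_zip_replicate_sum (c : Int) :
    ∀ (invs : List Int),
      ((((List.replicate invs.length c).zip invs)).map (fun q => q.1 * q.2)).sum = c * invs.sum := by
  intro invs
  induction invs with
  | nil => simp
  | cons i rest ih =>
    simp only [List.length_cons, List.replicate_succ, List.zip_cons_cons, List.map_cons,
      List.sum_cons, ih, List.sum_cons]
    ring

-- membership in patterns = "nonzero sign vector whose weighted sum is divisible by p"
theorem pv_mem_patterns (p : Int) (hp : 0 < p) (ms : List Int) (hnd : ms.Nodup) (v : List Int) :
    v ∈ pvZeroSumPatterns p ms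
      ↔ v ∈ (pvSV ms.length).tail
          ∧ p ∣ ((v.zip (ms.map (fun k => pvModInv k p))).map (fun q => q.1 * q.2)).sum := by
  rw [pv_patterns_eq p ms hnd, List.mem_filter]
  apply and_congr_right
  intro _
  rw [pv_tot_emod p hp _ 0 le_rfl hp, zero_add, beq_iff_eq]
  exact PySem.Int.emod_eq_zero_iff_dvd _ _

theorem pv_mem_tail_iff (m : Nat) (v : List Int) :
    v ∈ (pvSV m).tail ↔ v ∈ pvSV m ∧ v ≠ List.replicate m 0 := by
  constructor
  · intro h
    have hsv : v ∈ pvSV m := by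
      rw [pvSV_eq_cons m]; exact List.mem_cons_of_mem _ h
    refine ⟨hsv, ?_⟩
    intro rfl'
    have hnd := pv_sv_nodup m
    rw [pvSV_eq_cons m] at hnd
    exact (List.nodup_cons.1 hnd).1 (rfl' ▸ h)
  · rintro ⟨hsv, hne⟩
    rw [pvSV_eq_cons m] at hsv
    rcases List.mem_cons.1 hsv with h | h
    · exact absurd h hne
    · exact h

theorem pv_full_mem_tail (m : Nat) (hm : 0 < m) : List.replicate m 1 ∈ (pvSV m).tail := by
  rw [pv_mem_tail_iff]
  refine ⟨(pv_sv_mem m _).2 ⟨by simp, fun x hx => by simp_all [List.eq_of_mem_replicate hx]⟩, ?_⟩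
  intro h
  have := congrArg (fun l => l.getD 0 (2 : Int)) h
  cases m with
  | zero => omega
  | succ m => simp [List.replicate_succ] at this

theorem pv_neg_mem_tail (m : Nat) (v : List Int) (h : v ∈ (pvSV m).tail) :
    v.map (fun x => -x) ∈ (pvSV m).tail := by
  rw [pv_mem_tail_iff] at h ⊢
  obtain ⟨hsv, hne⟩ := h
  obtain ⟨hlen, hall⟩ := (pv_sv_mem m v).1 hsv
  constructor
  · refine (pv_sv_mem m _).2 ⟨by simpa using hlen, ?_⟩
    intro x hx
    obtain ⟨y, hy, rfl⟩ := List.mem_map.1 hx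
    rcases hall y hy with rfl | rfl | rfl <;> simp
  · intro hzero
    apply hne
    have : ∀ x ∈ v, x = 0 := by
      intro x hx
      have : -x ∈ List.replicate m (0 : Int) := hzero ▸ List.mem_map_of_mem hx
      have := List.eq_of_mem_replicate this
      omega
    exact List.eq_replicate_iff.2 ⟨hlen, this⟩

theorem pv_count_patterns (p : Int) (hp : 0 < p) (ms : List Int) (hnd : ms.Nodup) :
    pvCnt p (ms.map (fun k => pvModInv k p)) 0
      = 1 + ((pvZeroSumPatterns p ms).length : Int) := by
  rw [pv_cnt_count p hp _ 0 le_rfl hp, List.length_map]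
  conv_lhs => rw [pvSV_eq_cons ms.length]
  rw [List.countP_cons]
  have hz : (pvTot p ((List.replicate ms.length 0).zip (ms.map (fun k => pvModInv k p))) 0 == 0)
      = true := by
    rw [pv_tot_all_zero]
    · simp
    · intro q hq
      exact List.eq_of_mem_replicate (List.of_mem_zip hq).1
  rw [hz, List.countP_eq_length_filter, pv_patterns_eq p ms hnd]
  simp only [if_true]
  push_cast
  omega

theorem pv_replicate_ne (m : Nat) (hm : 0 < m) (a b : Int) (hab : a ≠ b) :
    List.replicate m a ≠ List.replicate m b := by
  cases m with
  | zero => omega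
  | succ m =>
    simp only [List.replicate_succ, ne_eq, List.cons.injEq]
    tauto

theorem pv_group_iff (p : Int) (hp : 0 < p) (ms : List Int) (hne : ms ≠ []) (hnd : ms.Nodup) :
    ((PySem.Set.equal (PySem.Set.ofList (pvZeroSumPatterns p ms))
        (PySem.Set.ofList [ms.map (fun _ => (1 : Int))])
      || PySem.Set.equal (PySem.Set.ofList (pvZeroSumPatterns p ms))
        (PySem.Set.ofList [ms.map (fun _ => (1 : Int)),
          (ms.map (fun _ => (1 : Int))).map (fun x => -x)])) = true)
    ↔ ((pvZeroSumPatterns p ms).length = 2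
        ∧ PySem.Int.mod (ms.map (fun k => pvModInv k p)).sum p = 0) := by
  set invs := ms.map (fun k => pvModInv k p) with hinvs
  set patterns := pvZeroSumPatterns p ms with hpat
  have hm : 0 < ms.length := List.length_pos_iff.2 hne
  have hfull : ms.map (fun _ => (1 : Int)) = List.replicate ms.length 1 := List.map_const'
  have hnegfull : (ms.map (fun _ => (1 : Int))).map (fun x => -x)
      = List.replicate ms.length (-1) := by rw [hfull, List.map_replicate]
  have hfne : List.replicate ms.length (1 : Int) ≠ List.replicate ms.length (-1) :=
    pv_replicate_ne _ hm _ _ (by norm_num)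
  have hlinv : invs.length = ms.length := List.length_map ..
  have hSfull : (((List.replicate ms.length (1:Int)).zip invs).map (fun q => q.1 * q.2)).sum
      = invs.sum := by
    rw [← hlinv, pv_zip_replicate_sum]; ring
  have hSneg : (((List.replicate ms.length (-1:Int)).zip invs).map (fun q => q.1 * q.2)).sum
      = -invs.sum := by
    rw [← hlinv, pv_zip_replicate_sum]; ring
  have hmodiff : PySem.Int.mod invs.sum p = 0 ↔ p ∣ invs.sum := by
    rw [PySem.Int.mod_eq_emod_of_pos hp]
    exact PySem.Int.emod_eq_zero_iff_dvd _ _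
  have hmem : ∀ v, v ∈ patterns ↔ v ∈ (pvSV ms.length).tail
      ∧ p ∣ ((v.zip invs).map (fun q => q.1 * q.2)).sum := fun v => pv_mem_patterns p hp ms hnd v
  have htail_nodup : ((pvSV ms.length).tail).Nodup := by
    have := pv_sv_nodup ms.length
    rw [pvSV_eq_cons ms.length] at this
    exact (List.nodup_cons.1 this).2
  have hpat_nodup : patterns.Nodup := by
    rw [hpat, pv_patterns_eq p ms hnd]
    exact htail_nodup.filter _
  have hfull_tail : List.replicate ms.length (1:Int) ∈ (pvSV ms.length).tail :=
    pv_full_mem_tail ms.length hm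
  have hneg_tail : List.replicate ms.length (-1:Int) ∈ (pvSV ms.length).tail := by
    have := pv_neg_mem_tail ms.length _ hfull_tail
    rwa [List.map_replicate, show -(1:Int) = -1 from rfl] at this
  have hfull_pat : p ∣ invs.sum → List.replicate ms.length (1:Int) ∈ patterns := by
    intro hd
    exact (hmem _).2 ⟨hfull_tail, by rwa [hSfull]⟩
  have hneg_pat : p ∣ invs.sum → List.replicate ms.length (-1:Int) ∈ patterns := by
    intro hd
    exact (hmem _).2 ⟨hneg_tail, by rw [hSneg]; exact hd.neg_right⟩
  rw [hnegfull, hfull]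
  constructor
  · intro h
    rcases Bool.or_eq_true_iff.1 h with h1 | h1
    · exfalso
      have hiff := (PySem.Set.equal_iff _ _).1 h1
      have hfp : List.replicate ms.length (1:Int) ∈ patterns := by
        have : List.replicate ms.length (1:Int) ∈ PySem.Set.ofList patterns := by
          rw [hiff]; simp [PySem.Set.mem_ofList]
        rwa [PySem.Set.mem_ofList] at this
      have hd : p ∣ invs.sum := by
        have h2 := ((hmem _).1 hfp).2
        rwa [hSfull] at h2
      have hnp := hneg_pat hd
      have : List.replicate ms.length (-1:Int) ∈ PySem.Set.ofList patterns :=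
        (PySem.Set.mem_ofList _ _).2 hnp
      rw [hiff] at this
      rw [PySem.Set.mem_ofList] at this
      simp only [List.mem_singleton] at this
      exact hfne this.symm
    · have hiff := (PySem.Set.equal_iff _ _).1 h1
      have hmemiff : ∀ x, x ∈ patterns ↔ x ∈ [List.replicate ms.length (1:Int),
          List.replicate ms.length (-1:Int)] := by
        intro x
        rw [← PySem.Set.mem_ofList (xs := patterns), hiff, PySem.Set.mem_ofList]
      have hfp : List.replicate ms.length (1:Int) ∈ patterns := by
        rw [hmemiff]; simp
      have hd : p ∣ invs.sum := by
        have h2 := ((hmem _).1 hfp).2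
        rwa [hSfull] at h2
      have hperm : patterns.Perm [List.replicate ms.length (1:Int),
          List.replicate ms.length (-1:Int)] := by
        rw [List.perm_ext_iff_of_nodup hpat_nodup (by simp [hfne])]
        exact hmemiff
      exact ⟨by simpa using hperm.length_eq, hmodiff.2 hd⟩
  · rintro ⟨hlen2, hmod⟩
    have hd := hmodiff.1 hmod
    have hsub : [List.replicate ms.length (1:Int), List.replicate ms.length (-1:Int)] ⊆
        patterns := by
      intro x hx
      rcases List.mem_cons.1 hx with rfl | hx
      · exact hfull_pat hd
      · rcases List.mem_cons.1 hx with rfl | hx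
        · exact hneg_pat hd
        · simp at hx
    have hsp : List.Subperm [List.replicate ms.length (1:Int), List.replicate ms.length (-1:Int)]
        patterns := (List.nodup_cons.2 ⟨by simp [hfne], by simp⟩).subperm hsub

    have hperm := (hsp.perm_of_length_le (by simp [hlen2])).symm
    apply Bool.or_eq_true_iff.2
    right
    rw [PySem.Set.equal_iff]
    intro x
    rw [PySem.Set.mem_ofList, PySem.Set.mem_ofList]
    exact hperm.mem_iff

theorem pv_main (N : Int) (af : List Int) :
    forced_by_modular_obstruction_py N af = forced_by_modular_obstruction_py_alt N af := by
  unfold forced_by_modular_obstruction_py forced_by_modular_obstruction_py_alt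
  rw [PySem.List.foldl_ite_eq_foldl_filter]
  apply PySem.List.foldl_congr_mem
  intro acc x hx
  have hp2 : 2 ≤ x := pv_mem_primesUpTo (List.mem_filter.1 hx).1
  have hp : 0 < x := by omega
  set ms := (PySem.List.pyRange 1 (PySem.Int.floordiv N x + 1) 1).filter
    (fun k => !(af.contains (k * x))) with hms
  have hnd : ms.Nodup := (PySem.List.nodup_pyRange_one _ _).filter _
  by_cases he : ms.isEmpty
  · simp only [he, if_true]
  · have hne : ms ≠ [] := by simpa [List.isEmpty_iff] using he
    simp only [he]
    have hzc := pv_e_getD x hp (ms.map (fun k => pvModInv k x)) 0 le_rfl hp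
    rw [pv_count_patterns x hp ms hnd] at hzc
    rw [hzc]
    simp only [Bool.false_eq_true, if_false]
    by_cases hpe : pvZeroSumPatterns x ms = []
    · simp [hpe]
    · have hie : (pvZeroSumPatterns x ms).isEmpty = false := by
        simpa [List.isEmpty_iff] using hpe
      have hlenpos : 0 < (pvZeroSumPatterns x ms).length := List.length_pos_iff.2 hpe
      have h1 : ((1 + ((pvZeroSumPatterns x ms).length : Int) == 1)) = false := by
        simp only [beq_eq_false_iff_ne, ne_eq]
        omega
      rw [h1, hie]
      simp only [Bool.false_eq_true, if_false]
      have hGB := pv_group_iff x hp ms hne hnd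
      have hR : ((1 + ((pvZeroSumPatterns x ms).length : Int) == 3
          && PySem.Int.mod (ms.map (fun k => pvModInv k x)).sum x == 0) = true)
          ↔ ((pvZeroSumPatterns x ms).length = 2
              ∧ PySem.Int.mod (ms.map (fun k => pvModInv k x)).sum x = 0) := by
        rw [Bool.and_eq_true, beq_iff_eq, beq_iff_eq]
        constructor
        · rintro ⟨h3, hm0⟩
          exact ⟨by omega, hm0⟩
        · rintro ⟨h2, hm0⟩
          exact ⟨by omega, hm0⟩
      by_cases hc : ((pvZeroSumPatterns x ms).length = 2
          ∧ PySem.Int.mod (ms.map (fun k => pvModInv k x)).sum x = 0)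
      · rw [if_pos (hGB.2 hc), if_pos (hR.2 hc)]
      · rw [if_neg (fun h => hc (hGB.1 h)), if_neg (fun h => hc (hR.1 h))]

-- ===== VERDICT (by name: the statement is the Claim_ definition above) =====
theorem forced_by_modular_obstruction_py_spec : Claim_equal_forced_by_modular_obstruction_py := by
  intro N already_forced _
  unfold Spec_forced_by_modular_obstruction_py
  exact pv_main N already_forced
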